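-- pv_equiv track=rewrite | github.com/IdanG7/Sentinel | agents/patchbot/patchbot/fixer.py | _get_relevant_lines
-- ===== SOURCE A (Python) =====
-- from typing import Dict, List, Optional
--
-- def _get_relevant_lines(
--     content: str, error_lines: List[int], context: int = 10
-- ) -> str:
--     """Get relevant lines from file content."""
--     lines = content.split("\n")
--
--     if not error_lines:
--         # Show first 50 lines if no specific error lines
--         return "\n".join(lines[:50])
--
--     # Get lines around errors with context
--     relevant_lines = set()
--     for error_line in error_lines:
--         start = max(0, error_line - context - 1)  # -1 for 0-indexing
--         end = min(len(lines), error_line + context)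
--         for i in range(start, end):
--             relevant_lines.add(i)
--
--     # Sort and format
--     sorted_lines = sorted(relevant_lines)
--     result = []
--
--     for i, line_num in enumerate(sorted_lines):
--         # Add separator for gaps
--         if i > 0 and line_num - sorted_lines[i - 1] > 1:
--             result.append("    ...")
--
--         result.append(f"{line_num + 1:4d} | {lines[line_num]}")
--
--     return "\n".join(result)
-- ===== SOURCE B (Python) =====
-- from typing import List
--
--
-- def _get_relevant_lines(
--     content: str, error_lines: List[int], context: int = 10
-- ) -> str:
--     """Get relevant lines from file content."""
--     lines = content.split("\n")
--
--     if not error_lines: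
--         # Show first 50 lines if no specific error lines
--         return "\n".join(lines[:50])
--
--     out = []
--     prev = None
--     for i, line in enumerate(lines):
--         if any(e - context - 1 <= i < e + context for e in error_lines):
--             if prev is not None and i - prev > 1:
--                 out.append("    ...")
--             out.append(f"{i + 1:4d} | {line}")
--             prev = i
--     return "\n".join(out)
-- ===== Notes on version B (the rewrite author's own statement) =====
-- stated objective: simpler
-- what changed: B drops A's set-of-indices + sort + index-lookback pass and instead makes a single pass over enumerate(lines), keeping a line iff its index falls in some error window and carrying the previously printed index to decide separators; it never materialises or sorts the index set.
import Mathlib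
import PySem

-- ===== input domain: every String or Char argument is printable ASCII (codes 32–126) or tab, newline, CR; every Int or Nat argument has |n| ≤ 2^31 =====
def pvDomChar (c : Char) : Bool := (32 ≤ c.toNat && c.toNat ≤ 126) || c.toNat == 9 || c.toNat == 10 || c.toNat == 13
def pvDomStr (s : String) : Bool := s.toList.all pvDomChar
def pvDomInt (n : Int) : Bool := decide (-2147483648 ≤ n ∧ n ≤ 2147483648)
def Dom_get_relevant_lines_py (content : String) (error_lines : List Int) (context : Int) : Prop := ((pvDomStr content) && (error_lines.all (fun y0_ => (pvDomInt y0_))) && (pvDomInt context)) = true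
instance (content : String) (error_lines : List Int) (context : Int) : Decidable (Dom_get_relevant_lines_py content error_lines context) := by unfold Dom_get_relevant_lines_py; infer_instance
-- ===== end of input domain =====

-- B replaces A's index-set + sort + lookback pass by one pass over enumerate(lines); objective: simpler. --

-- shared f-string helper: f"{x:4d}" (right-align to width 4 with spaces)
def pvPad4 (x : Int) : String :=
  let s := PySem.Int.toStr x
  String.ofList (List.replicate (4 - s.toList.length) ' ' ++ s.toList)

-- ===== PORT A =====
def get_relevant_lines_py (content : String) (error_lines : List Int) (context : Int) : String :=
  let lines := (PySem.Str.split? content "\n").getD []   -- sep "\n" ≠ "": split? is always `some` here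
  if error_lines = [] then
    PySem.Str.join "\n" (PySem.List.slice lines none (some 50))
  else
    let relevant : PySem.Set Int :=
      error_lines.foldl (fun s e =>
        let start := max 0 (e - context - 1)
        let stop := min ((lines.length : Int)) (e + context)
        (PySem.List.pyRange start stop 1).foldl (fun s i => PySem.Set.add s i) s)
        PySem.Set.empty
    let sorted_lines := PySem.List.sorted relevant (fun x => x) false
    let result : List String := (PySem.List.enumerate sorted_lines).foldl (fun r p =>
      let r := if 0 < p.1 ∧ p.2 - (PySem.List.pyGet? sorted_lines (p.1 - 1)).getD 0 > 1
               then r ++ ["    ..."] else r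
      r ++ [pvPad4 (p.2 + 1) ++ " | " ++ PySem.List.pyGetD lines p.2 ""]) []
    PySem.Str.join "\n" result

-- ===== PORT B =====
def get_relevant_lines_py_alt (content : String) (error_lines : List Int) (context : Int) : String :=
  let lines := (PySem.Str.split? content "\n").getD []   -- sep "\n" ≠ "": split? is always `some` here
  if error_lines = [] then
    PySem.Str.join "\n" (PySem.List.slice lines none (some 50))
  else
    let fin : List String × Option Int := (PySem.List.enumerate lines).foldl
      (fun (st : List String × Option Int) p =>
        if error_lines.any (fun e => decide (e - context - 1 ≤ p.1) && decide (p.1 < e + context)) then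
          let out := match st.2 with
            | some pv => if p.1 - pv > 1 then st.1 ++ ["    ..."] else st.1
            | none => st.1
          (out ++ [pvPad4 (p.1 + 1) ++ " | " ++ p.2], some p.1)
        else st)
      ([], none)
    PySem.Str.join "\n" fin.1

-- ===== PRECONDITION & SPEC =====
def Spec_get_relevant_lines_py (content : String) (error_lines : List Int) (context : Int) (out : String) : Prop := out = get_relevant_lines_py_alt content error_lines context
instance (content : String) (error_lines : List Int) (context : Int) (out : String) : Decidable (Spec_get_relevant_lines_py content error_lines context out) := by unfold Spec_get_relevant_lines_py; infer_instance

-- ===== CLAIM (what is proved, stated in full; the proofs are below) =====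
def Claim_equal_get_relevant_lines_py : Prop := ∀ (content : String) (error_lines : List Int) (context : Int), Dom_get_relevant_lines_py content error_lines context → Spec_get_relevant_lines_py content error_lines context (get_relevant_lines_py content error_lines context)

-- ===== LEMMAS AND PROOFS =====

-- the fold both programs reduce to: walk the kept indices carrying the previously
-- printed index; emit the separator on a gap, then the formatted row
def pvCanon (lines : List String) : List Int → Option Int → List String → List String
  | [], _, acc => acc
  | i :: t, prev, acc =>
      pvCanon lines t (some i)
        ((match prev with
          | some pv => if i - pv > 1 then acc ++ ["    ..."] else acc
          | none => acc) ++ [pvPad4 (i + 1) ++ " | " ++ PySem.List.pyGetD lines i ""])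

-- membership in A's accumulated set of indices
lemma pv_mem_relevant (es : List Int) (c n x : Int) :
    x ∈ es.foldl (fun s e =>
        (PySem.List.pyRange (max 0 (e - c - 1)) (min n (e + c)) 1).foldl
          (fun s i => PySem.Set.add s i) s) (PySem.Set.empty : PySem.Set Int)
      ↔ ∃ e ∈ es, max 0 (e - c - 1) ≤ x ∧ x < min n (e + c) := by
  have h : ∀ (es : List Int) (s : PySem.Set Int),
      x ∈ es.foldl (fun s e =>
        (PySem.List.pyRange (max 0 (e - c - 1)) (min n (e + c)) 1).foldl
          (fun s i => PySem.Set.add s i) s) s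
      ↔ x ∈ s ∨ ∃ e ∈ es, max 0 (e - c - 1) ≤ x ∧ x < min n (e + c) := by
    intro es
    induction es with
    | nil => simp
    | cons e t ih =>
      intro s
      have hin : x ∈ (PySem.List.pyRange (max 0 (e - c - 1)) (min n (e + c)) 1).foldl
          (fun s i => PySem.Set.add s i) s ↔ x ∈ s ∨ (max 0 (e - c - 1) ≤ x ∧ x < min n (e + c)) := by
        have := PySem.Set.mem_foldl_add (PySem.List.pyRange (max 0 (e - c - 1)) (min n (e + c)) 1)
          (fun i => i) s x
        simpa [PySem.List.mem_pyRange_one, eq_comm] using this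
      simp only [List.foldl_cons, ih, hin, List.mem_cons]
      constructor
      · rintro ((hs | hr) | ⟨e', he', hb⟩)
        · exact Or.inl hs
        · exact Or.inr ⟨e, Or.inl rfl, hr⟩
        · exact Or.inr ⟨e', Or.inr he', hb⟩
      · rintro (hs | ⟨e', (rfl | he'), hb⟩)
        · exact Or.inl (Or.inl hs)
        · exact Or.inl (Or.inr hb)
        · exact Or.inr ⟨e', he', hb⟩
  simpa using h es PySem.Set.empty

lemma pv_nodup_relevant (es : List Int) (c n : Int) :
    (es.foldl (fun s e =>
        (PySem.List.pyRange (max 0 (e - c - 1)) (min n (e + c)) 1).foldl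
          (fun s i => PySem.Set.add s i) s) (PySem.Set.empty : PySem.Set Int)).Nodup := by
  have h : ∀ (es : List Int) (s : PySem.Set Int), s.Nodup →
      (es.foldl (fun s e =>
        (PySem.List.pyRange (max 0 (e - c - 1)) (min n (e + c)) 1).foldl
          (fun s i => PySem.Set.add s i) s) s).Nodup := by
    intro es
    induction es with
    | nil => intro s hs; simpa using hs
    | cons e t ih =>
      intro s hs
      exact ih _ (PySem.Set.nodup_update s (PySem.List.pyRange (max 0 (e - c - 1)) (min n (e + c)) 1) hs)
  exact h es PySem.Set.empty List.nodup_nil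

-- A's sorted index list is the filtered range
lemma pv_sorted_eq (es : List Int) (c n : Int) :
    PySem.List.sorted
      (es.foldl (fun s e =>
        (PySem.List.pyRange (max 0 (e - c - 1)) (min n (e + c)) 1).foldl
          (fun s i => PySem.Set.add s i) s) (PySem.Set.empty : PySem.Set Int))
      (fun x => x) false
    = (PySem.List.pyRange 0 n 1).filter
        (fun i => es.any (fun e => decide (e - c - 1 ≤ i) && decide (i < e + c))) := by
  refine PySem.List.sorted_eq_of_perm_of_pairwise_lt (κ := Int) _ _ (fun x => x) ?_ ?_
  · apply (List.perm_ext_iff_of_nodup (List.Pairwise.filter _ (PySem.List.nodup_pyRange_one 0 n))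
      (pv_nodup_relevant es c n)).2
    intro x
    rw [pv_mem_relevant, List.mem_filter, PySem.List.mem_pyRange_one, List.any_eq_true]
    constructor
    · rintro ⟨⟨h0, hn⟩, ⟨e, he, hb⟩⟩
      simp only [Bool.and_eq_true, decide_eq_true_eq] at hb
      exact ⟨e, he, by omega, by omega⟩
    · rintro ⟨e, he, h1, h2⟩
      refine ⟨⟨by omega, by omega⟩, ⟨e, he, ?_⟩⟩
      simp only [Bool.and_eq_true, decide_eq_true_eq]
      omega
  · exact List.Pairwise.filter _
      (by simpa using PySem.List.pairwise_lt_pyRange_one (a := 0) (b := n))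

-- A's index-lookback loop is pvCanon
lemma pv_lookback (lines : List String) (pre ys : List Int) (acc : List String) :
    (PySem.List.enumerate ys (pre.length : Int)).foldl (fun r p =>
      (if 0 < p.1 ∧ p.2 - (PySem.List.pyGet? (pre ++ ys) (p.1 - 1)).getD 0 > 1
       then r ++ ["    ..."] else r)
      ++ [pvPad4 (p.2 + 1) ++ " | " ++ PySem.List.pyGetD lines p.2 ""]) acc
    = pvCanon lines ys pre.getLast? acc := by
  induction ys generalizing pre acc with
  | nil => simp [pvCanon, PySem.List.enumerate_nil]
  | cons i t ih =>
    rw [PySem.List.enumerate_cons, List.foldl_cons]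
    rcases List.eq_nil_or_concat pre with hpre | ⟨pre', a, rfl⟩
    · subst hpre
      simp only [List.length_nil, Int.natCast_zero, List.nil_append, List.getLast?_nil]
      rw [if_neg (by omega : ¬ (0 < (0:Int) ∧ i - (PySem.List.pyGet? (i :: t) ((0:Int) - 1)).getD 0 > 1))]
      have h1 : (0:Int) + 1 = (([i] : List Int).length : Int) := by simp
      have h2 : (i :: t) = [i] ++ t := rfl
      rw [h1, h2]
      exact (ih [i] _).trans (by simp [pvCanon])
    · simp only [List.concat_eq_append]
      have hget : PySem.List.pyGet? ((pre' ++ [a]) ++ i :: t) (((pre' ++ [a]).length : Int) - 1)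
          = some a := by
        have h1 : ((pre' ++ [a]).length : Int) - 1 = (pre'.length : Int) := by
          simp [List.length_append]
        have h2 : (pre' ++ [a]) ++ i :: t = pre' ++ (a :: (i :: t)) := by simp
        rw [h1, h2]
        exact PySem.List.pyGet?_append_length pre' (i :: t) a
      have hlen : (0:Int) < ((pre' ++ [a]).length : Int) := by
        simp [List.length_append]
      have hassoc : (pre' ++ [a]) ++ i :: t = ((pre' ++ [a]) ++ [i]) ++ t := by simp
      have hidx : ((pre' ++ [a]).length : Int) + 1 = ((((pre' ++ [a]) ++ [i]).length : Nat) : Int) := by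
        simp only [List.length_append, List.length_cons, List.length_nil]
        omega
      by_cases hgap : i - a > 1
      · rw [if_pos ⟨hlen, by rw [hget]; simpa using hgap⟩]
        rw [hassoc, hidx]
        exact (ih _ _).trans (by simp [pvCanon, hgap])
      · rw [if_neg (fun hc => hgap (by rw [hget] at hc; simpa using hc.2))]
        rw [hassoc, hidx]
        exact (ih _ _).trans (by simp [pvCanon, hgap])

-- B's prev-carrying loop is pvCanon (first component)
lemma pv_pairfold (lines : List String) (L : List Int) (prev : Option Int) (acc : List String) :
    (L.foldl (fun (st : List String × Option Int) i =>
        ((match st.2 with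
          | some pv => if i - pv > 1 then st.1 ++ ["    ..."] else st.1
          | none => st.1) ++ [pvPad4 (i + 1) ++ " | " ++ PySem.List.pyGetD lines i ""], some i))
      (acc, prev)).1
    = pvCanon lines L prev acc := by
  induction L generalizing prev acc with
  | nil => simp [pvCanon]
  | cons i t ih =>
    rw [List.foldl_cons]
    exact ih _ _

-- ===== VERDICT =====
theorem get_relevant_lines_py_spec : Claim_equal_get_relevant_lines_py := by
  intro content error_lines context _
  unfold Spec_get_relevant_lines_py
  by_cases h : error_lines = []
  · simp [get_relevant_lines_py, get_relevant_lines_py_alt, h]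
  · simp only [get_relevant_lines_py, get_relevant_lines_py_alt, if_neg h]
    congr 1
    rw [pv_sorted_eq]
    rw [PySem.List.enumerate_eq_map_pyRange _ "", List.foldl_map]
    rw [PySem.List.foldl_if_eq_foldl_filter
      (fun j => error_lines.any (fun e => decide (e - context - 1 ≤ j) && decide (j < e + context)))
      (fun (st : List String × Option Int) j =>
        ((match st.2 with
          | some pv => if j - pv > 1 then st.1 ++ ["    ..."] else st.1
          | none => st.1) ++ [pvPad4 (j + 1) ++ " | " ++ PySem.List.pyGetD ((PySem.Str.split? content "\n").getD []) j ""], some j))]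
    rw [pv_pairfold]
    have := pv_lookback ((PySem.Str.split? content "\n").getD []) []
      (((PySem.List.pyRange 0 (((PySem.Str.split? content "\n").getD []).length : Int) 1)).filter
        (fun i => error_lines.any (fun e => decide (e - context - 1 ≤ i) && decide (i < e + context)))) []
    simp only [List.length_nil, Int.natCast_zero, List.nil_append, List.getLast?_nil] at this
    exact this
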